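-- pv_equiv track=rewrite | github.com/JohnDorsey/inlinetesting | PureGenTools.py | gen_track_recent_full
-- ===== SOURCE A (Python) =====
-- import collections
--
-- class MysteriousError(Exception):
--     """ don't catch this. Just identify its cause and replace it with a better exception. and then maybe catch it. """
--     pass
--
-- def gen_track_recent(input_seq, count=None, default=None):
--     history = collections.deque([default for i in range(count)])
--     for item in input_seq:
--         history.append(item)
--         history.popleft()
--         yield tuple(history)
--
-- def gen_track_recent_full(input_seq, count=None, allow_waste=False):
--     assert count >= 2
--     leftSentinel = object()
--     result = gen_track_recent(input_seq, count=count, default=leftSentinel)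
--
--     trash = tuple(leftSentinel for i in range(count))
--     while trash.count(leftSentinel) > 1:
--         try:
--             trash = next(result)
--         except StopIteration:
--             if allow_waste:
--                 return ()
--             else:
--                 raise MysteriousError(f"Not enough items to yield a full batch of {count} items.")
--     assert trash.count(leftSentinel) == 1
--     assert trash[0] is leftSentinel
--     return result
-- ===== SOURCE B (Python) =====
-- class MysteriousError(Exception):
--     """ don't catch this. Just identify its cause and replace it with a better exception. and then maybe catch it. """
--     pass
--
-- def gen_track_recent_full(input_seq, count=None, allow_waste=False):
--     assert count >= 2
--     seq = list(input_seq)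
--     if len(seq) < count - 1:
--         if allow_waste:
--             return ()
--         raise MysteriousError(f"Not enough items to yield a full batch of {count} items.")
--     return (tuple(seq[i:i + count]) for i in range(len(seq) - count + 1))
-- ===== Notes on version B (the rewrite author's own statement) =====
-- stated objective: simpler
-- what changed: Replaces the sentinel-deque generator chain and its draining while-loop with a direct length check followed by a slice-based sliding-window comprehension.
import Mathlib
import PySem

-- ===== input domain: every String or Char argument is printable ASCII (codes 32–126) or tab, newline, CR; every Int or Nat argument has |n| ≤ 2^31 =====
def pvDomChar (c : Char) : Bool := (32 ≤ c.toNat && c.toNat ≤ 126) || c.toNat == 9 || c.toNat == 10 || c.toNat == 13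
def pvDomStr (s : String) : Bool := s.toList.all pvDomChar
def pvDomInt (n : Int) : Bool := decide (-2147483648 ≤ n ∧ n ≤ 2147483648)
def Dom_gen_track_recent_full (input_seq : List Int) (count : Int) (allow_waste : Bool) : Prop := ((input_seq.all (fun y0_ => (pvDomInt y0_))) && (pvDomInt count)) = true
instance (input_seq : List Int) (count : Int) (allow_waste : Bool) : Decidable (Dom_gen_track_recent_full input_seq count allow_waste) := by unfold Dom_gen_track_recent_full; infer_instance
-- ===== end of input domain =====

-- B replaces A's sentinel-deque generator chain and draining while-loop by a length
-- check plus a slice-based sliding-window comprehension (objective: simpler).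

-- ===== PORT A =====
-- gen_track_recent's yield loop: history is a deque of Option Int, the unique
-- leftSentinel object modelled as `none` (input items are `some _`, so `none`
-- occurs exactly where the sentinel does and `trash.count(leftSentinel)` is
-- `List.count none`).
def gtrGo (history : List (Option Int)) : List Int → List (List (Option Int))
  | [] => []
  | item :: rest =>
      let h := (history ++ [some item]).drop 1   -- history.append(item); history.popleft()
      h :: gtrGo h rest                          -- yield tuple(history)

def gen_track_recent (input_seq : List Int) (count : Int) : List (List (Option Int)) :=
  gtrGo (List.replicate count.toNat none) input_seq   -- deque([default for i in range(count)])

-- the `while trash.count(leftSentinel) > 1: trash = next(result)` loop;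
-- `none` models StopIteration (A then returns () if allow_waste else raises).
def pullLoop : List (List (Option Int)) → List (Option Int) → Option (List (List (Option Int)))
  | ws, trash =>
    if List.count none trash > 1 then
      match ws with
      | [] => none
      | w :: rest => pullLoop rest w
    else some ws
termination_by ws _ => ws.length

def gen_track_recent_full (input_seq : List Int) (count : Int) (allow_waste : Bool) : List (List Int) :=
  if 2 ≤ count then        -- assert count >= 2 (failure raises: outside Pre_)
    let result := gen_track_recent input_seq count
    let trash := List.replicate count.toNat none   -- tuple(leftSentinel for i in range(count))
    match pullLoop result trash with
    | none => []           -- StopIteration: return () if allow_waste, else raise (raise is outside Pre_)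
    | some ws => ws.map (fun w => w.filterMap id)  -- remaining generator, yielding full tuples
  else []

-- ===== PORT B =====
def gen_track_recent_full_alt (input_seq : List Int) (count : Int) (allow_waste : Bool) : List (List Int) :=
  if 2 ≤ count then        -- assert count >= 2
    if (input_seq.length : Int) < count - 1 then []   -- return () if allow_waste, else raise (outside Pre_)
    else -- (tuple(seq[i:i+count]) for i in range(len(seq)-count+1)); seq[i:i+count] with
         -- 0 ≤ i is exactly (drop i).take count
      (List.range (input_seq.length + 1 - count.toNat)).map
        (fun i => (input_seq.drop i).take count.toNat)
  else []

-- ===== PRECONDITION & SPEC =====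
-- Pre_ excludes exactly the inputs where A raises: count < 2 (AssertionError) and
-- len(input_seq) < count-1 with allow_waste = False (MysteriousError).
def Pre_gen_track_recent_full (input_seq : List Int) (count : Int) (allow_waste : Bool) : Prop :=
  2 ≤ count ∧ (allow_waste = true ∨ count - 1 ≤ (input_seq.length : Int))
instance (input_seq : List Int) (count : Int) (allow_waste : Bool) : Decidable (Pre_gen_track_recent_full input_seq count allow_waste) := by unfold Pre_gen_track_recent_full; infer_instance

def pvWitness_gen_track_recent_full : List Int × Int × Bool := ([1, 2, 3], 2, false)

def Spec_gen_track_recent_full (input_seq : List Int) (count : Int) (allow_waste : Bool) (out : List (List Int)) : Prop := out = gen_track_recent_full_alt input_seq count allow_waste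
instance (input_seq : List Int) (count : Int) (allow_waste : Bool) (out : List (List Int)) : Decidable (Spec_gen_track_recent_full input_seq count allow_waste out) := by unfold Spec_gen_track_recent_full; infer_instance

-- ===== CLAIM (what is proved, stated in full; the proofs are below) =====
def Claim_equal_gen_track_recent_full : Prop := ∀ (input_seq : List Int) (count : Int) (allow_waste : Bool), Dom_gen_track_recent_full input_seq count allow_waste → Pre_gen_track_recent_full input_seq count allow_waste → Spec_gen_track_recent_full input_seq count allow_waste (gen_track_recent_full input_seq count allow_waste)

-- ===== LEMMAS AND PROOFS =====

-- a list of `some`s contains no `none`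
theorem count_none_map_some (l : List Int) : List.count (α := Option Int) none (l.map some) = 0 := by
  simp [List.count_eq_zero]

-- draining loop: starting with e+1 sentinels in the history, the loop consumes
-- e windows (StopIteration if fewer), leaving history none :: map some (t ++ take e seq).
theorem drain (e : Nat) : ∀ (seq t : List Int) (trash : List (Option Int)),
    List.count none trash = e + 1 →
    pullLoop (gtrGo (List.replicate (e + 1) none ++ t.map some) seq) trash =
      if seq.length < e then none
      else some (gtrGo (none :: (t ++ seq.take e).map some) (seq.drop e)) := by
  induction e with
  | zero =>
      intro seq t trash htr
      rw [pullLoop.eq_def]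
      simp [htr]
  | succ e ih =>
      intro seq t trash htr
      rw [pullLoop.eq_def]
      simp only [htr]
      have hgt : e + 1 + 1 > 1 := by omega
      simp only [if_pos hgt]
      cases seq with
      | nil => simp [gtrGo]
      | cons x xs =>
          have hh : ((List.replicate (e + 1 + 1) none ++ t.map some) ++ [some x]).drop 1
              = List.replicate (e + 1) none ++ (t ++ [x]).map some := by
            simp [List.replicate_succ, List.append_assoc]
          rw [gtrGo]
          simp only [hh]
          rw [ih xs (t ++ [x]) _ (by simp [count_none_map_some, List.count_append])]
          simp only [List.length_cons, List.take_succ_cons, List.drop_succ_cons,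
            List.append_assoc, List.singleton_append]
          by_cases hxe : xs.length < e
          · have h1 : xs.length + 1 < e + 1 := by omega
            rw [if_pos hxe, if_pos h1]
          · have h1 : ¬ (xs.length + 1 < e + 1) := by omega
            rw [if_neg hxe, if_neg h1]

-- after all sentinels but one are gone the history is all-`some`; each further step
-- yields a full window, a slice of v ++ rest.
theorem someChar : ∀ (rest : List Int) (v : List Int), v ≠ [] →
    (gtrGo (v.map some) rest).map (fun w => w.filterMap id) =
      (List.range rest.length).map (fun i => ((v ++ rest).drop (i + 1)).take v.length) := by
  intro rest
  induction rest with
  | nil => intro v _; simp [gtrGo]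
  | cons x xs ih =>
      intro v hv
      cases v with
      | nil => exact absurd rfl hv
      | cons a v' =>
          have hh : ((a :: v').map some ++ [some x]).drop 1 = (v' ++ [x]).map some := by
            simp
          rw [gtrGo]
          simp only [hh]
          rw [List.map_cons, ih (v' ++ [x]) (by simp)]
          simp only [List.length_cons, List.range_succ_eq_map, List.map_cons, List.map_map]
          congr 1
          · have h1 : List.drop (0 + 1) (a :: v' ++ x :: xs) = (v' ++ [x]) ++ xs := by simp
            have h2 : v'.length + 1 = (v' ++ [x]).length := by simp
            rw [h1, h2, List.take_append_of_le_length (le_refl _), List.take_length]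
            simp
          · apply List.map_congr_left
            intro i _
            simp [Function.comp, List.append_assoc]

-- the step from one remaining sentinel to the slice characterisation
theorem afterDrain (u rest : List Int) :
    (gtrGo (none :: u.map some) rest).map (fun w => w.filterMap id) =
      (List.range rest.length).map (fun i => ((u ++ rest).drop i).take (u.length + 1)) := by
  cases rest with
  | nil => simp [gtrGo]
  | cons x xs =>
      have hh : ((none :: u.map some) ++ [some x]).drop 1 = (u ++ [x]).map some := by simp
      rw [gtrGo]
      simp only [hh]
      rw [List.map_cons, someChar xs (u ++ [x]) (by simp)]
      simp only [List.length_cons, List.range_succ_eq_map, List.map_cons, List.map_map]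
      congr 1
      · have h1 : u ++ x :: xs = (u ++ [x]) ++ xs := by simp
        have h2 : u.length + 1 = (u ++ [x]).length := by simp
        rw [List.drop_zero, h2, h1, List.take_append_of_le_length (le_refl _), List.take_length]
        simp
      · apply List.map_congr_left
        intro i _
        simp [Function.comp, List.append_assoc]

-- ===== VERDICT (by name: the statement is the Claim_ definition above) =====
theorem gen_track_recent_full_spec : Claim_equal_gen_track_recent_full := by
  intro seq count aw _ hpre
  obtain ⟨hc2, hwaste⟩ := hpre
  unfold Spec_gen_track_recent_full gen_track_recent_full gen_track_recent_full_alt gen_track_recent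
  simp only [if_pos hc2]
  set c := count.toNat with hcdef
  have hc : 2 ≤ c := by omega
  have hrepl : List.replicate c none = List.replicate ((c - 1) + 1) none ++ (([] : List Int)).map some := by
    have : (c - 1) + 1 = c := by omega
    simp [this]
  rw [hrepl, drain (c - 1) seq [] _ (by simp)]
  by_cases hlen : seq.length < c - 1
  · have hint : (seq.length : Int) < count - 1 := by omega
    simp [hlen, hint]
  · have hint : ¬ ((seq.length : Int) < count - 1) := by omega
    simp only [if_neg hlen, if_neg hint]
    rw [List.nil_append, afterDrain]
    have h1 : seq.take (c - 1) ++ seq.drop (c - 1) = seq := List.take_append_drop _ _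
    have h2 : (seq.take (c - 1)).length = c - 1 := by simp; omega
    have h3 : (seq.drop (c - 1)).length = seq.length + 1 - c := by simp; omega
    rw [h1, h2, h3]
    have h4 : c - 1 + 1 = c := by omega
    rw [h4]
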